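-- pv_equiv track=rewrite | github.com/JrJessyLuo/multitab_qa_dmral | code/retriever/multitab_retrieve.py | find_valid_paths_from_pairs
-- ===== SOURCE A (Python) =====
-- def find_valid_paths_from_pairs(matrix, neighbors):
--     n, m = len(matrix), len(matrix[0])
--     results = []
--
--     # Preprocess neighbors into a mapping: (row, col) -> list of (row, col)
--     neighbor_map = {}
--     for (src, tgt) in neighbors:
--         if src not in neighbor_map:
--             neighbor_map[src] = []
--         neighbor_map[src].append(tgt)
--
--     def dfs(current, path, score):
--         row, col = current
--         # If we've reached the last column, add the current path and score.
--         if col == m - 1: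
--             results.append((path[:], score))
--             return
--         # Look up the valid neighbors for the current node
--         for next_node in neighbor_map.get((row, col), []):
--             next_row, next_col = next_node
--             # Allow same row in different columns; we check coordinate uniqueness.
--             if next_node in path:
--                 continue
--             next_score = score + matrix[next_row][next_col]
--             dfs(next_node, path + [next_node], next_score)
--
--     # Start DFS from all nodes in column 0
--     for row in range(n):
--         start = (row, 0)
--         dfs(start, [start], matrix[row][0])
--
--     return results
-- ===== SOURCE B (Python) =====
-- def find_valid_paths_from_pairs(matrix, neighbors):
--     n, m = len(matrix), len(matrix[0])
--
--     # Group neighbors into a mapping in one pass: (row, col) -> list of (row, col)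
--     neighbor_map = {}
--     for src, tgt in neighbors:
--         neighbor_map.setdefault(src, []).append(tgt)
--
--     results = []
--     # Iterative DFS with an explicit stack of (node, path, score) frames.
--     # Start rows and each node's neighbors are pushed in reverse so frames
--     # pop in the original forward order.
--     stack = []
--     for row in range(n - 1, -1, -1):
--         stack.append(((row, 0), [(row, 0)], matrix[row][0]))
--     while stack:
--         (row, col), path, score = stack.pop()
--         if col == m - 1:
--             results.append((path, score))
--             continue
--         for nb in reversed(neighbor_map.get((row, col), [])):
--             if nb in path:
--                 continue
--             r, c = nb
--             stack.append((nb, path + [nb], score + matrix[r][c]))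
--     return results
-- ===== Notes on version B (the rewrite author's own statement) =====
-- stated objective: alternative
-- what changed: The recursive dfs with a mutated results list is replaced by an iterative DFS over an explicit stack of (node, path, score) frames, pushing start rows and neighbors in reverse so frames pop in A's original order, and the neighbor map is built with setdefault in one pass.
import Mathlib
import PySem

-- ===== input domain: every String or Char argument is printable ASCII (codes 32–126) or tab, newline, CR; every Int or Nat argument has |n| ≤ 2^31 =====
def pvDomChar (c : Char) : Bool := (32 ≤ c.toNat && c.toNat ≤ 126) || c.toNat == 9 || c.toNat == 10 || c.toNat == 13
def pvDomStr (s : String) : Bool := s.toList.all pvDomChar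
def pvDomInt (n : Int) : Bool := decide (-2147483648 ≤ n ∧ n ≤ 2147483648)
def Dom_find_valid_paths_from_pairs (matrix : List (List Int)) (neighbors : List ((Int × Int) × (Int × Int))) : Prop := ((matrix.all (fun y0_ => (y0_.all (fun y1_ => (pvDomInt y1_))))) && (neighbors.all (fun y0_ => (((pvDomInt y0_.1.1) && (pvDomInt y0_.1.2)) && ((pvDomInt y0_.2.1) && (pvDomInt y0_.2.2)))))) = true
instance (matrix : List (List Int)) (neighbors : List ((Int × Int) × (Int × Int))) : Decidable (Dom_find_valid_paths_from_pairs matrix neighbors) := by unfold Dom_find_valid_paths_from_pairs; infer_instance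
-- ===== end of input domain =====

-- B rewrites A's recursive dfs (with a mutated results list) as an iterative DFS over an
-- explicit stack of (node, path, score) frames, pushing in reverse to keep A's output order
-- (objective: alternative decomposition, same asymptotic cost).

-- ===== PORT A =====

-- matrix[r][c] with Python's negative-index semantics; 0 where Python raises IndexError
-- (those inputs are excluded by Pre_; both ports use this same lookup).
def mgetPV (matrix : List (List Int)) (rc : Int × Int) : Int :=
  ((PySem.List.pyGet? matrix rc.1).bind (fun row => PySem.List.pyGet? row rc.2)).getD 0

-- all targets stored in the neighbor map (termination measure only)
def allTgtsPV (nmap : PySem.Dict (Int × Int) (List (Int × Int))) : List (Int × Int) :=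
  (PySem.Dict.values nmap).flatten

-- number of distinct stored targets not yet on the path (termination measure only)
def availPV (nmap : PySem.Dict (Int × Int) (List (Int × Int))) (path : List (Int × Int)) : Nat :=
  (((allTgtsPV nmap).filter (fun t => decide (t ∉ path))).dedup).length

lemma mem_allTgts_of_mem_getD (nmap : PySem.Dict (Int × Int) (List (Int × Int)))
    {k x : Int × Int} (h : x ∈ PySem.Dict.getD nmap k []) : x ∈ allTgtsPV nmap := by
  rw [PySem.Dict.getD_eq_get?_getD] at h
  cases hg : PySem.Dict.get? nmap k with
  | none => rw [hg] at h; simp at h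
  | some v =>
    rw [hg] at h
    have hv : v ∈ PySem.Dict.values nmap := by
      simp only [PySem.Dict.values]
      exact List.mem_map.2 ⟨(k, v), PySem.Dict.mem_items_of_get?_eq_some nmap hg, rfl⟩
    exact List.mem_flatten.2 ⟨v, hv, h⟩

lemma avail_decr (nmap : PySem.Dict (Int × Int) (List (Int × Int)))
    {path : List (Int × Int)} {x : Int × Int}
    (hx : x ∈ allTgtsPV nmap) (hnp : x ∉ path) :
    availPV nmap (path ++ [x]) < availPV nmap path := by
  unfold availPV
  rw [← List.card_toFinset, ← List.card_toFinset]
  apply Finset.card_lt_card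
  constructor
  · intro t ht
    simp only [List.mem_toFinset, List.mem_filter, decide_eq_true_eq, List.mem_append,
      List.mem_singleton] at ht ⊢
    exact ⟨ht.1, fun hc => ht.2 (Or.inl hc)⟩
  · intro hsub
    have h1 := hsub (by
      simp only [List.mem_toFinset, List.mem_filter, decide_eq_true_eq]
      exact ⟨hx, hnp⟩)
    simp at h1

-- the recursive dfs helper of A (results are returned instead of appended to a mutable list)
def dfsA (matrix : List (List Int)) (m : Int) (nmap : PySem.Dict (Int × Int) (List (Int × Int)))
    (current : Int × Int) (path : List (Int × Int)) (score : Int) :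
    List ((List (Int × Int)) × Int) :=
  if current.2 = m - 1 then [(path, score)]
  else
    (PySem.Dict.getD nmap current []).attach.flatMap (fun nx =>
      if h : nx.1 ∈ path then []
      else dfsA matrix m nmap nx.1 (path ++ [nx.1]) (score + mgetPV matrix nx.1))
termination_by availPV nmap path
decreasing_by exact avail_decr nmap (mem_allTgts_of_mem_getD nmap nx.2) h

def find_valid_paths_from_pairs (matrix : List (List Int)) (neighbors : List ((Int × Int) × (Int × Int))) : List ((List (Int × Int)) × Int) :=
  let n : Int := matrix.length
  let m : Int := (matrix.headD []).length  -- len(matrix[0]); matrix ≠ [] by Pre_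
  let nmap := neighbors.foldl (fun d p =>
      let d' := if PySem.Dict.contains d p.1 then d else PySem.Dict.insert d p.1 ([] : List (Int × Int))
      PySem.Dict.insert d' p.1 (PySem.Dict.getD d' p.1 [] ++ [p.2])) PySem.Dict.empty
  (PySem.List.pyRange 0 n 1).flatMap (fun row =>
    dfsA matrix m nmap (row, 0) [(row, 0)] (mgetPV matrix (row, 0)))

-- ===== PORT B =====

-- weight of one stack frame / of a stack (termination measure only)
def wtPV (nmap : PySem.Dict (Int × Int) (List (Int × Int))) (path : List (Int × Int)) : Nat :=
  ((allTgtsPV nmap).length + 1) ^ availPV nmap path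

def muPV (nmap : PySem.Dict (Int × Int) (List (Int × Int)))
    (stack : List ((Int × Int) × List (Int × Int) × Int)) : Nat :=
  (stack.map (fun f => wtPV nmap f.2.1)).sum

lemma fold_push_eq (matrix : List (List Int)) (path : List (Int × Int)) (score : Int)
    (l : List (Int × Int)) (rest : List ((Int × Int) × List (Int × Int) × Int)) :
    (l.reverse).foldl (fun st nb => if nb ∈ path then st else (nb, path ++ [nb], score + mgetPV matrix nb) :: st) rest
    = l.filterMap (fun nb => if nb ∈ path then none else some (nb, path ++ [nb], score + mgetPV matrix nb)) ++ rest := by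
  rw [List.foldl_reverse]
  induction l with
  | nil => simp
  | cons a l ih =>
    by_cases ha : a ∈ path <;> simp [ha, ih]

lemma getD_len_le (nmap : PySem.Dict (Int × Int) (List (Int × Int))) (k : Int × Int) :
    (PySem.Dict.getD nmap k []).length ≤ (allTgtsPV nmap).length := by
  rw [PySem.Dict.getD_eq_get?_getD]
  cases hg : PySem.Dict.get? nmap k with
  | none => simp
  | some v =>
    have hv : v ∈ PySem.Dict.values nmap := by
      simp only [PySem.Dict.values]
      exact List.mem_map.2 ⟨(k, v), PySem.Dict.mem_items_of_get?_eq_some nmap hg, rfl⟩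
    simpa [allTgtsPV, List.length_flatten] using
      List.le_sum_of_mem (List.mem_map_of_mem (f := List.length) hv)

lemma mu_push_lt (matrix : List (List Int)) (nmap : PySem.Dict (Int × Int) (List (Int × Int)))
    (cur : Int × Int) (path : List (Int × Int)) (score : Int)
    (rest : List ((Int × Int) × List (Int × Int) × Int)) :
    muPV nmap ((PySem.Dict.getD nmap cur []).reverse.foldl
        (fun st nb => if nb ∈ path then st else (nb, path ++ [nb], score + mgetPV matrix nb) :: st) rest)
      < wtPV nmap path + muPV nmap rest := by
  simp only [muPV, fold_push_eq, List.map_append, List.sum_append]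
  apply Nat.add_lt_add_right
  by_cases hall : ∀ nb ∈ PySem.Dict.getD nmap cur [], nb ∈ path
  · have hnil : (PySem.Dict.getD nmap cur []).filterMap
        (fun nb => if nb ∈ path then none else some (nb, path ++ [nb], score + mgetPV matrix nb)) = [] := by
      rw [List.filterMap_eq_nil_iff]
      intro a ha
      simp [hall a ha]
    rw [hnil]
    simp only [List.map_nil, List.sum_nil, wtPV]
    exact pow_pos (by omega) _
  · push Not at hall
    obtain ⟨nb0, hnb0, hnp0⟩ := hall
    have he1 : 1 ≤ availPV nmap path := by
      have hm : nb0 ∈ ((allTgtsPV nmap).filter (fun t => decide (t ∉ path))).dedup :=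
        List.mem_dedup.2 (List.mem_filter.2 ⟨mem_allTgts_of_mem_getD nmap hnb0, by simpa using hnp0⟩)
      exact List.length_pos_of_mem hm
    set C := (allTgtsPV nmap).length with hC
    set e := availPV nmap path with he
    have hbound : ∀ w ∈ ((PySem.Dict.getD nmap cur []).filterMap
        (fun nb => if nb ∈ path then none else some (nb, path ++ [nb], score + mgetPV matrix nb))).map
          (fun f => wtPV nmap f.2.1), w ≤ (C + 1) ^ (e - 1) := by
      intro w hw
      obtain ⟨f, hf, rfl⟩ := List.mem_map.1 hw
      obtain ⟨nb, hnb, hmk⟩ := List.mem_filterMap.1 hf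
      by_cases hp : nb ∈ path
      · simp [hp] at hmk
      · simp only [hp, if_false, Option.some.injEq] at hmk
        subst hmk
        have hd : availPV nmap (path ++ [nb]) < e :=
          avail_decr nmap (mem_allTgts_of_mem_getD nmap hnb) hp
        have hd' : availPV nmap (nb, path ++ [nb], score + mgetPV matrix nb).2.1 < e := hd
        simp only [wtPV]
        exact Nat.pow_le_pow_right (by omega) (by omega)
    have hsum := List.sum_le_card_nsmul _ _ hbound
    have hlen : (((PySem.Dict.getD nmap cur []).filterMap
        (fun nb => if nb ∈ path then none else some (nb, path ++ [nb], score + mgetPV matrix nb))).map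
          (fun f => wtPV nmap f.2.1)).length ≤ C := by
      rw [List.length_map]
      exact le_trans (List.length_filterMap_le _ _) (getD_len_le nmap cur)
    have hpow : 0 < (C + 1) ^ (e - 1) := pow_pos (by omega) _
    calc (((PySem.Dict.getD nmap cur []).filterMap
        (fun nb => if nb ∈ path then none else some (nb, path ++ [nb], score + mgetPV matrix nb))).map
          (fun f => wtPV nmap f.2.1)).sum
        ≤ (((PySem.Dict.getD nmap cur []).filterMap
            (fun nb => if nb ∈ path then none else some (nb, path ++ [nb], score + mgetPV matrix nb))).map
              (fun f => wtPV nmap f.2.1)).length * (C + 1) ^ (e - 1) := by simpa using hsum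
      _ ≤ C * (C + 1) ^ (e - 1) := Nat.mul_le_mul_right _ hlen
      _ < (C + 1) * (C + 1) ^ (e - 1) := by
          exact Nat.mul_lt_mul_of_lt_of_le (by omega) (le_refl _) hpow
      _ = (C + 1) ^ e := by
          rw [← pow_succ']
          congr 1
          omega
      _ = wtPV nmap path := by rw [wtPV]

def runB (matrix : List (List Int)) (m : Int) (nmap : PySem.Dict (Int × Int) (List (Int × Int))) :
    List ((Int × Int) × List (Int × Int) × Int) → List ((List (Int × Int)) × Int) →
    List ((List (Int × Int)) × Int)
  | [], results => results
  | (cur, path, score) :: rest, results =>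
    if cur.2 = m - 1 then runB matrix m nmap rest (results ++ [(path, score)])
    else
      runB matrix m nmap
        ((PySem.Dict.getD nmap cur []).reverse.foldl
          (fun st nb => if nb ∈ path then st else (nb, path ++ [nb], score + mgetPV matrix nb) :: st) rest)
        results
termination_by stack _ => muPV nmap stack
decreasing_by
  · have hw : 0 < wtPV nmap path := by
      unfold wtPV
      exact pow_pos (by omega) _
    simp only [muPV, List.map_cons, List.sum_cons]
    omega
  · have h := mu_push_lt matrix nmap cur path score rest
    simp only [muPV, List.map_cons, List.sum_cons] at h ⊢
    exact h

def find_valid_paths_from_pairs_alt (matrix : List (List Int)) (neighbors : List ((Int × Int) × (Int × Int))) : List ((List (Int × Int)) × Int) :=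
  let n : Int := matrix.length
  let m : Int := (matrix.headD []).length  -- len(matrix[0]); matrix ≠ [] by Pre_
  let nmap := neighbors.foldl (fun d p =>
      let d' := PySem.Dict.setdefault d p.1 ([] : List (Int × Int))
      PySem.Dict.insert d' p.1 (PySem.Dict.getD d' p.1 [] ++ [p.2])) PySem.Dict.empty
  runB matrix m nmap
    ((PySem.List.pyRange (n - 1) (-1) (-1)).foldl
      (fun st row => ((row, 0), [(row, 0)], mgetPV matrix (row, 0)) :: st) [])
    []

-- ===== PRECONDITION & SPEC =====

-- can matrix[t.1][t.2] be read without IndexError (Python negative indices allowed)?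
def pvIdxOK (matrix : List (List Int)) (t : Int × Int) : Bool :=
  ((PySem.List.pyGet? matrix t.1).bind (fun row => PySem.List.pyGet? row t.2)).isSome

-- the set of nodes A's DFS ever visits: column-0 starts, closed under following a neighbor
-- edge from a non-final-column node to an indexable target (a plain graph-reachability
-- closure over the finite target set, not a re-run of the DFS: paths and scores play no role)
def pvVisited (matrix : List (List Int)) (neighbors : List ((Int × Int) × (Int × Int))) : List (Int × Int) :=
  let m : Int := (matrix.headD []).length
  let step := fun (V : List (Int × Int)) =>
    neighbors.foldl (fun V p =>
      if V.contains p.1 && !decide (p.1.2 = m - 1) && pvIdxOK matrix p.2 && !V.contains p.2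
      then V ++ [p.2] else V) V
  step^[neighbors.length] ((PySem.List.pyRange 0 matrix.length 1).map (fun r => (r, (0 : Int))))

-- Pre_ excludes exactly the inputs on which Python A raises IndexError: an empty matrix or an
-- empty row (len(matrix[0]) / the starting matrix[row][0] reads), or a neighbor edge whose
-- source is actually visited by the DFS but whose target is out of the matrix's index range
-- (the matrix[next_row][next_col] read). On every input admitted by Pre_, A returns normally.
def Pre_find_valid_paths_from_pairs (matrix : List (List Int)) (neighbors : List ((Int × Int) × (Int × Int))) : Prop :=
  (!matrix.isEmpty && matrix.all (fun row => !row.isEmpty) &&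
    neighbors.all (fun p =>
      !((pvVisited matrix neighbors).contains p.1
          && !decide (p.1.2 = ((matrix.headD []).length : Int) - 1))
        || pvIdxOK matrix p.2)) = true
instance (matrix : List (List Int)) (neighbors : List ((Int × Int) × (Int × Int))) : Decidable (Pre_find_valid_paths_from_pairs matrix neighbors) := by unfold Pre_find_valid_paths_from_pairs; infer_instance

def pvWitness_find_valid_paths_from_pairs : List (List Int) × (List ((Int × Int) × (Int × Int))) :=
  ([[1, 5], [2, 6]], [((0, 0), (1, 1))])

def Spec_find_valid_paths_from_pairs (matrix : List (List Int)) (neighbors : List ((Int × Int) × (Int × Int))) (out : List ((List (Int × Int)) × Int)) : Prop := out = find_valid_paths_from_pairs_alt matrix neighbors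
instance (matrix : List (List Int)) (neighbors : List ((Int × Int) × (Int × Int))) (out : List ((List (Int × Int)) × Int)) : Decidable (Spec_find_valid_paths_from_pairs matrix neighbors out) := by unfold Spec_find_valid_paths_from_pairs; infer_instance

-- ===== CLAIM (what is proved, stated in full; the proofs are below) =====
def Claim_equal_find_valid_paths_from_pairs : Prop := ∀ (matrix : List (List Int)) (neighbors : List ((Int × Int) × (Int × Int))), Dom_find_valid_paths_from_pairs matrix neighbors → Pre_find_valid_paths_from_pairs matrix neighbors → Spec_find_valid_paths_from_pairs matrix neighbors (find_valid_paths_from_pairs matrix neighbors)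

-- ===== LEMMAS AND PROOFS =====

lemma builders_eq :
    (fun (d : PySem.Dict (Int × Int) (List (Int × Int))) (p : (Int × Int) × (Int × Int)) =>
      let d' := if PySem.Dict.contains d p.1 then d else PySem.Dict.insert d p.1 ([] : List (Int × Int))
      PySem.Dict.insert d' p.1 (PySem.Dict.getD d' p.1 [] ++ [p.2]))
    = (fun d p =>
      let d' := PySem.Dict.setdefault d p.1 ([] : List (Int × Int))
      PySem.Dict.insert d' p.1 (PySem.Dict.getD d' p.1 [] ++ [p.2])) := by
  funext d p
  by_cases h : PySem.Dict.contains d p.1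
  · simp only [h, if_true, PySem.Dict.setdefault_of_contains d _ h]
  · simp only [h, if_false, Bool.false_eq_true,
      PySem.Dict.setdefault_of_not_contains d _ (by simpa using h)]

lemma flatMap_kept (matrix : List (List Int)) (m : Int)
    (nmap : PySem.Dict (Int × Int) (List (Int × Int)))
    (path : List (Int × Int)) (score : Int) (l : List (Int × Int)) :
    ((l.filterMap (fun nb => if nb ∈ path then none else some (nb, path ++ [nb], score + mgetPV matrix nb))).map
        (fun f => dfsA matrix m nmap f.1 f.2.1 f.2.2)).flatten
    = l.attach.flatMap (fun nx =>
        if _h : nx.1 ∈ path then []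
        else dfsA matrix m nmap nx.1 (path ++ [nx.1]) (score + mgetPV matrix nx.1)) := by
  have hattach : l.attach.flatMap (fun nx =>
        if _h : nx.1 ∈ path then []
        else dfsA matrix m nmap nx.1 (path ++ [nx.1]) (score + mgetPV matrix nx.1))
      = l.flatMap (fun nb =>
        if nb ∈ path then []
        else dfsA matrix m nmap nb (path ++ [nb]) (score + mgetPV matrix nb)) := by
    simp only [dite_eq_ite]
    conv_rhs => rw [← List.attach_map_subtype_val l]
    rw [List.flatMap_map]
  rw [hattach]
  clear hattach
  induction l with
  | nil => simp
  | cons a t ih =>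
    by_cases ha : a ∈ path <;> simp [ha, ih]

lemma runB_eq (matrix : List (List Int)) (m : Int)
    (nmap : PySem.Dict (Int × Int) (List (Int × Int)))
    (stack : List ((Int × Int) × List (Int × Int) × Int)) (results : List ((List (Int × Int)) × Int)) :
    runB matrix m nmap stack results
    = results ++ (stack.map (fun f => dfsA matrix m nmap f.1 f.2.1 f.2.2)).flatten := by
  fun_induction runB matrix m nmap stack results with
  | case1 results => simp
  | case2 cur path score rest results h ih =>
    rw [ih]
    have hd : dfsA matrix m nmap cur path score = [(path, score)] := by
      rw [dfsA, if_pos h]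
    simp [hd]
  | case3 cur path score rest results h ih =>
    simp only [dite_eq_ite] at ih
    rw [ih, fold_push_eq]
    have hd : dfsA matrix m nmap cur path score
        = (((PySem.Dict.getD nmap cur []).filterMap
            (fun nb => if nb ∈ path then none else some (nb, path ++ [nb], score + mgetPV matrix nb))).map
              (fun f => dfsA matrix m nmap f.1 f.2.1 f.2.2)).flatten := by
      rw [dfsA, if_neg h]
      exact (flatMap_kept matrix m nmap path score _).symm
    simp [hd]

lemma start_stack_eq (matrix : List (List Int)) (n : Int) :
    (PySem.List.pyRange (n - 1) (-1) (-1)).foldl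
      (fun st row => ((row, 0), [(row, 0)], mgetPV matrix (row, 0)) :: st)
      ([] : List ((Int × Int) × List (Int × Int) × Int))
    = (PySem.List.pyRange 0 n 1).map
        (fun row => ((row, (0 : Int)), [(row, (0 : Int))], mgetPV matrix (row, 0))) := by
  have h : PySem.List.pyRange (n - 1) (-1) (-1) = (PySem.List.pyRange 0 n 1).reverse := by
    rw [PySem.List.pyRange_neg_one_eq_reverse]; norm_num
  rw [h, List.foldl_reverse, List.map_eq_foldr]

-- ===== VERDICT (by name: the statement is the Claim_ definition above) =====
theorem find_valid_paths_from_pairs_spec : Claim_equal_find_valid_paths_from_pairs := by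
  intro matrix neighbors _ _
  unfold Spec_find_valid_paths_from_pairs
  dsimp only [find_valid_paths_from_pairs, find_valid_paths_from_pairs_alt]
  rw [← builders_eq]
  dsimp only
  rw [runB_eq]
  rw [start_stack_eq matrix (matrix.length : Int)]
  simp only [List.flatMap_def, List.map_map, List.nil_append]
  rfl
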